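-- pv_equiv track=rewrite | github.com/LongWeeeeeee/bets | base/test_filters.py | is_early_match_v6
-- ===== SOURCE A (Python) =====
-- from typing import Tuple, Optional, Dict, Any
--
-- def is_early_match_v6(match: Dict) -> Tuple[bool, Optional[str]]:
--     """
--     ВАРИАНТ 6: Стабильный lead >= 4k минимум 5 минут подряд на 15-30.
--     """
--     leads = match.get('radiantNetworthLeads', [])
--     duration = len(leads)
--
--     if duration < 30 or duration > 50:
--         return False, None
--
--     # Ищем 5 минут подряд с lead >= 4k
--     consecutive_r = 0
--     consecutive_d = 0
--
--     for i in range(15, min(30, duration)):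
--         if leads[i] >= 4000:
--             consecutive_r += 1
--             consecutive_d = 0
--             if consecutive_r >= 5:
--                 return True, 'radiant'
--         elif leads[i] <= -4000:
--             consecutive_d += 1
--             consecutive_r = 0
--             if consecutive_d >= 5:
--                 return True, 'dire'
--         else:
--             consecutive_r = 0
--             consecutive_d = 0
--
--     return False, None
-- ===== SOURCE B (Python) =====
-- from typing import Tuple, Optional, Dict, Any
--
-- def is_early_match_v6(match: Dict) -> Tuple[bool, Optional[str]]:
--     """
--     Group the 15:30 window into maximal runs of same-sign classification and
--     look for the first run of length >= 5 that is 'r' (lead >= 4k) or 'd' (lead <= -4k).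
--     """
--     leads = match.get('radiantNetworthLeads', [])
--     duration = len(leads)
--
--     if duration < 30 or duration > 50:
--         return False, None
--
--     keys = ['r' if v >= 4000 else 'd' if v <= -4000 else 'n'
--             for v in leads[15:30]]
--     while keys:
--         k = keys[0]
--         run = 0
--         while keys and keys[0] == k:
--             keys.pop(0)
--             run += 1
--         if run >= 5 and k in ('r', 'd'):
--             return True, 'radiant' if k == 'r' else 'dire'
--     return False, None
-- ===== Notes on version B (the rewrite author's own statement) =====
-- stated objective: alternative
-- what changed: Replaces A's two-counter streak scan (with reset logic and early return at count 5) by a run-length decomposition: classify each window element as 'r'/'d'/'n', group the window into maximal consecutive runs, and return on the first 'r' or 'd' run of length >= 5.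
import Mathlib
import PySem

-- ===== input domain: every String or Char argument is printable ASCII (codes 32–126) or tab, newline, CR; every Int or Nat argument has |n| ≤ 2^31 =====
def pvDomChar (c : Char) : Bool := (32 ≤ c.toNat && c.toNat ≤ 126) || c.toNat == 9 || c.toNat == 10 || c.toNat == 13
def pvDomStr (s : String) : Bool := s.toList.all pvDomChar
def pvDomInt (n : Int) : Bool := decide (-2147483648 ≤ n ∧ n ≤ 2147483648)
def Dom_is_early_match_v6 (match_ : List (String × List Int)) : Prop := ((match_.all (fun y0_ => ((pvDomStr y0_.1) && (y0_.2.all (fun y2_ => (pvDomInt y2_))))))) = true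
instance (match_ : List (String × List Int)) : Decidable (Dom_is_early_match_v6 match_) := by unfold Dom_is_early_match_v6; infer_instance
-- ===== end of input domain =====

-- B replaces A's two-counter streak scan by classifying the 15:30 window and scanning its
-- maximal consecutive runs for the first 'r'/'d' run of length >= 5 (alternative decomposition).

-- ===== PORT A =====
-- the for-loop over range(15, min(30, duration)) with the two consecutive counters;
-- leads[i] is always in range under the duration guard, so the getD default is never used
def pvLoopA (leads : List Int) : List Int → Int → Int → Bool × Option String
  | [], _, _ => (false, none)
  | i :: rest, cr, cd =>
    let x := (PySem.List.pyGet? leads i).getD 0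
    if x ≥ 4000 then
      if cr + 1 ≥ 5 then (true, some "radiant") else pvLoopA leads rest (cr + 1) 0
    else if x ≤ -4000 then
      if cd + 1 ≥ 5 then (true, some "dire") else pvLoopA leads rest 0 (cd + 1)
    else
      pvLoopA leads rest 0 0

def is_early_match_v6 (match_ : List (String × List Int)) : Bool × Option String :=
  let leads := (match_.lookup "radiantNetworthLeads").getD []
  let duration : Int := leads.length
  if duration < 30 ∨ duration > 50 then (false, none)
  else pvLoopA leads (PySem.List.pyRange 15 (min 30 duration) 1) 0 0

-- ===== PORT B =====
def pvKeyOf (v : Int) : Char := if v ≥ 4000 then 'r' else if v ≤ -4000 then 'd' else 'n'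

-- the outer while over keys: take the maximal leading run, test it, continue on the rest
def pvScanRuns : List Char → Bool × Option String
  | [] => (false, none)
  | k :: rest =>
    let run := 1 + (rest.takeWhile (· == k)).length
    if run ≥ 5 ∧ (k = 'r' ∨ k = 'd') then
      (true, some (if k = 'r' then "radiant" else "dire"))
    else
      pvScanRuns (rest.dropWhile (· == k))
termination_by ks => ks.length
decreasing_by
  simpa using Nat.lt_succ_of_le (List.length_dropWhile_le (· == k) rest)

def is_early_match_v6_alt (match_ : List (String × List Int)) : Bool × Option String :=
  let leads := (match_.lookup "radiantNetworthLeads").getD []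
  let duration : Int := leads.length
  if duration < 30 ∨ duration > 50 then (false, none)
  else pvScanRuns ((PySem.List.slice leads (some 15) (some 30)).map pvKeyOf)

-- ===== PRECONDITION & SPEC =====
def Spec_is_early_match_v6 (match_ : List (String × List Int)) (out : Bool × Option String) : Prop := out = is_early_match_v6_alt match_
instance (match_ : List (String × List Int)) (out : Bool × Option String) : Decidable (Spec_is_early_match_v6 match_ out) := by unfold Spec_is_early_match_v6; infer_instance

-- ===== CLAIM (what is proved, stated in full; the proofs are below) =====
def Claim_equal_is_early_match_v6 : Prop := ∀ (match_ : List (String × List Int)), Dom_is_early_match_v6 match_ → Spec_is_early_match_v6 match_ (is_early_match_v6 match_)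

-- ===== LEMMAS AND PROOFS =====

-- A's loop over an index list computes the same as the key-character loop below
def pvCharLoop : List Char → Int → Int → Bool × Option String
  | [], _, _ => (false, none)
  | k :: rest, cr, cd =>
    if k = 'r' then
      if cr + 1 ≥ 5 then (true, some "radiant") else pvCharLoop rest (cr + 1) 0
    else if k = 'd' then
      if cd + 1 ≥ 5 then (true, some "dire") else pvCharLoop rest 0 (cd + 1)
    else
      pvCharLoop rest 0 0

theorem pvLoopA_eq_charLoop (leads : List Int) (idxs : List Int) (cr cd : Int) :
    pvLoopA leads idxs cr cd
      = pvCharLoop (idxs.map (fun i => pvKeyOf ((PySem.List.pyGet? leads i).getD 0))) cr cd := by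
  induction idxs generalizing cr cd with
  | nil => rfl
  | cons i rest ih =>
    simp only [pvLoopA, pvCharLoop, List.map_cons]
    by_cases h1 : (4000 : Int) ≤ (PySem.List.pyGet? leads i).getD 0
    · have hk : pvKeyOf ((PySem.List.pyGet? leads i).getD 0) = 'r' := by simp [pvKeyOf, h1]
      rw [hk]; simp [h1, ih]
    · by_cases h2 : (PySem.List.pyGet? leads i).getD 0 ≤ -4000
      · have hk : pvKeyOf ((PySem.List.pyGet? leads i).getD 0) = 'd' := by simp [pvKeyOf, h1, h2]
        rw [hk]; simp [h1, h2, ih]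
      · have hk : pvKeyOf ((PySem.List.pyGet? leads i).getD 0) = 'n' := by simp [pvKeyOf, h1, h2]
        rw [hk]; simp [h1, h2, ih]

-- skipping a maximal run of a neutral character does not change pvScanRuns
theorem pvScanRuns_dropWhile_neutral (k : Char) (hk : ¬ (k = 'r' ∨ k = 'd')) (t : List Char) :
    pvScanRuns (t.dropWhile (· == k)) = pvScanRuns t := by
  cases t with
  | nil => simp
  | cons c t' =>
    by_cases hc : c = k
    · subst hc
      rw [List.dropWhile_cons_of_pos (by simp)]
      conv_rhs => rw [pvScanRuns]
      rw [if_neg (by simp [hk])]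
    · rw [List.dropWhile_cons_of_neg (by simp [hc])]

-- master lemma: the counter loop equals the run scan, with the partial-run generalisations
set_option maxHeartbeats 1600000 in
theorem pvCharLoop_spec : ∀ n (ks : List Char), ks.length ≤ n →
    (pvCharLoop ks 0 0 = pvScanRuns ks)
    ∧ (∀ cr : Int, 1 ≤ cr → cr ≤ 4 →
        pvCharLoop ks cr 0
          = if cr + (ks.takeWhile (· == 'r')).length ≥ 5 then (true, some "radiant")
            else pvScanRuns (ks.dropWhile (· == 'r')))
    ∧ (∀ cd : Int, 1 ≤ cd → cd ≤ 4 →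
        pvCharLoop ks 0 cd
          = if cd + (ks.takeWhile (· == 'd')).length ≥ 5 then (true, some "dire")
            else pvScanRuns (ks.dropWhile (· == 'd'))) := by
  intro n
  induction n with
  | zero =>
    intro ks hks
    have : ks = [] := List.eq_nil_of_length_eq_zero (Nat.le_zero.mp hks)
    subst this
    refine ⟨by simp [pvCharLoop, pvScanRuns], ?_, ?_⟩ <;>
      · intro c h1 h4
        rw [if_neg (by simp; omega)]
        simp [pvCharLoop, pvScanRuns]
  | succ n ih =>
    intro ks hks
    cases ks with
    | nil =>
      refine ⟨by simp [pvCharLoop, pvScanRuns], ?_, ?_⟩ <;>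
        · intro c h1 h4
          rw [if_neg (by simp; omega)]
          simp [pvCharLoop, pvScanRuns]
    | cons k t =>
      have ht : t.length ≤ n := by simp at hks; omega
      obtain ⟨IH1, IH2, IH3⟩ := ih t ht
      clear ih hks
      by_cases hkr : k = 'r'
      · subst hkr
        refine ⟨?_, ?_, ?_⟩
        · -- fresh counters meet the start of an 'r' run
          have e1 : pvCharLoop ('r' :: t) 0 0 = pvCharLoop t 1 0 := by simp [pvCharLoop]
          rw [e1, IH2 1 (by omega) (by omega)]
          conv_rhs => rw [pvScanRuns]
          split_ifs <;> first | rfl | (exfalso; simp_all; omega) | (exfalso; simp_all) | simp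
        · -- an ongoing 'r' streak continues
          intro cr h1 h4
          by_cases h5 : (5 : Int) ≤ cr + 1
          · have e1 : pvCharLoop ('r' :: t) cr 0 = (true, some "radiant") := by
              simp [pvCharLoop, h5]
            rw [e1, show List.takeWhile (· == 'r') ('r' :: t) = 'r' :: List.takeWhile (· == 'r') t from by simp]
            split_ifs with h6
            · rfl
            · exfalso; simp at h6; omega
          · have e1 : pvCharLoop ('r' :: t) cr 0 = pvCharLoop t (cr + 1) 0 := by
              simp [pvCharLoop, h5]
            rw [e1, IH2 (cr + 1) (by omega) (by omega)]
            split_ifs <;> first | rfl | (exfalso; simp_all; omega) | (exfalso; simp_all) | simp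
        · -- an 'r' element resets a 'd' streak
          intro cd h1 h4
          have e1 : pvCharLoop ('r' :: t) 0 cd = pvCharLoop t 1 0 := by simp [pvCharLoop]
          rw [e1, IH2 1 (by omega) (by omega)]
          rw [show List.takeWhile (· == 'd') ('r' :: t) = [] from by simp,
            show List.dropWhile (· == 'd') ('r' :: t) = 'r' :: t from by simp]
          conv_rhs => rw [pvScanRuns]
          split_ifs <;> first | rfl | (exfalso; simp_all; omega) | (exfalso; simp_all) | simp
      · by_cases hkd : k = 'd'
        · subst hkd
          refine ⟨?_, ?_, ?_⟩
          · -- fresh counters meet the start of a 'd' run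
            have e1 : pvCharLoop ('d' :: t) 0 0 = pvCharLoop t 0 1 := by simp [pvCharLoop]
            rw [e1, IH3 1 (by omega) (by omega)]
            conv_rhs => rw [pvScanRuns]
            split_ifs <;> first | rfl | (exfalso; simp_all; omega) | (exfalso; simp_all) | simp
          · -- a 'd' element resets an 'r' streak
            intro cr h1 h4
            have e1 : pvCharLoop ('d' :: t) cr 0 = pvCharLoop t 0 1 := by simp [pvCharLoop]
            rw [e1, IH3 1 (by omega) (by omega)]
            rw [show List.takeWhile (· == 'r') ('d' :: t) = [] from by simp,
              show List.dropWhile (· == 'r') ('d' :: t) = 'd' :: t from by simp]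
            conv_rhs => rw [pvScanRuns]
            split_ifs <;> first | rfl | (exfalso; simp_all; omega) | (exfalso; simp_all) | simp
          · -- an ongoing 'd' streak continues
            intro cd h1 h4
            by_cases h5 : (5 : Int) ≤ cd + 1
            · have e1 : pvCharLoop ('d' :: t) 0 cd = (true, some "dire") := by
                simp [pvCharLoop, h5]
              rw [e1, show List.takeWhile (· == 'd') ('d' :: t) = 'd' :: List.takeWhile (· == 'd') t from by simp]
              split_ifs with h6
              · rfl
              · exfalso; simp at h6; omega
            · have e1 : pvCharLoop ('d' :: t) 0 cd = pvCharLoop t 0 (cd + 1) := by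
                simp [pvCharLoop, h5]
              rw [e1, IH3 (cd + 1) (by omega) (by omega)]
              split_ifs <;> first | rfl | (exfalso; simp_all; omega) | (exfalso; simp_all) | simp
        · -- a neutral element resets both streaks
          have hk : ¬ (k = 'r' ∨ k = 'd') := by tauto
          have e1 : ∀ cr cd : Int, pvCharLoop (k :: t) cr cd = pvCharLoop t 0 0 := by
            intro cr cd; simp [pvCharLoop, hkr, hkd]
          refine ⟨?_, ?_, ?_⟩
          · rw [e1, IH1]
            conv_rhs => rw [pvScanRuns]
            rw [if_neg (by simp [hkr, hkd])]
            rw [pvScanRuns_dropWhile_neutral k hk t]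
          · intro cr h1 h4
            rw [e1, IH1]
            rw [List.takeWhile_cons_of_neg (by simp [hkr]), List.dropWhile_cons_of_neg (by simp [hkr])]
            rw [if_neg (by simp; omega)]
            conv_rhs => rw [pvScanRuns]
            rw [if_neg (by simp [hkr, hkd])]
            rw [pvScanRuns_dropWhile_neutral k hk t]
          · intro cd h1 h4
            rw [e1, IH1]
            rw [List.takeWhile_cons_of_neg (by simp [hkd]), List.dropWhile_cons_of_neg (by simp [hkd])]
            rw [if_neg (by simp; omega)]
            conv_rhs => rw [pvScanRuns]
            rw [if_neg (by simp [hkr, hkd])]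
            rw [pvScanRuns_dropWhile_neutral k hk t]

theorem pvCharLoop_eq_scanRuns (ks : List Char) : pvCharLoop ks 0 0 = pvScanRuns ks :=
  (pvCharLoop_spec ks.length ks le_rfl).1

-- the mapped index list of A equals the mapped slice of B when 30 ≤ leads.length
theorem pv_keys_eq (leads : List Int) (h : 30 ≤ leads.length) :
    (PySem.List.pyRange 15 (min 30 (leads.length : Int)) 1).map
        (fun i => pvKeyOf ((PySem.List.pyGet? leads i).getD 0))
      = (PySem.List.slice leads (some 15) (some 30)).map pvKeyOf := by
  have hmin : min (30 : Int) (leads.length : Int) = 30 := by omega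
  have hs : PySem.List.slice leads (some 15) (some 30) = (leads.drop 15).take 15 := by
    rw [PySem.List.slice_toNat leads (by norm_num) (by norm_num)]
    rfl
  rw [hmin, hs, PySem.List.pyRange_one]
  apply List.ext_getElem
  · simp; omega
  · intro j hj1 hj2
    have hj : j < 15 := by simp at hj1; norm_num at hj1; omega
    have hjl : 15 + j < leads.length := by omega
    simp only [List.getElem_map, List.getElem_range, List.getElem_take, List.getElem_drop]
    have hcast : (15 : Int) - 15 + ((15 : Int) + (j : Int)) = ((15 + j : Nat) : Int) := by
      push_cast; ring
    congr 1
    have h15 : (15 : Int) + (j : Int) = ((15 + j : Nat) : Int) := by push_cast; ring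
    rw [h15, PySem.List.pyGet?_natCast, List.getElem?_eq_getElem hjl]
    rfl

-- ===== VERDICT (by name: the statement is the Claim_ definition above) =====
theorem is_early_match_v6_spec : Claim_equal_is_early_match_v6 := by
  intro match_ _
  unfold Spec_is_early_match_v6 is_early_match_v6 is_early_match_v6_alt
  set leads := (match_.lookup "radiantNetworthLeads").getD [] with hleads
  by_cases hdur : (leads.length : Int) < 30 ∨ (leads.length : Int) > 50
  · rw [if_pos hdur, if_pos hdur]
  · have h30 : 30 ≤ leads.length := by omega
    rw [if_neg hdur, if_neg hdur,
      pvLoopA_eq_charLoop, pv_keys_eq leads h30, pvCharLoop_eq_scanRuns]
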